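-- pv_equiv track=rewrite | github.com/EduardoRP5/Prueba | codingbat_words.py | word_multiple
-- ===== SOURCE A (Python) =====
-- def word_multiple(strings):
--     word_map = {}
--     for w in strings:
--         if w not in word_map:
--             word_map[w] = False
--         else:
--             word_map[w] = True
--     return word_map
-- ===== SOURCE B (Python) =====
-- from collections import Counter
--
-- def word_multiple(strings):
--     counts = Counter(strings)
--     return {w: c > 1 for w, c in counts.items()}
-- ===== Notes on version B (the rewrite author's own statement) =====
-- stated objective: idiomatic
-- what changed: B builds a full integer frequency tally with collections.Counter in one pass and then maps each word to count > 1 in a dict comprehension, instead of A's single loop that flips a running boolean per key via membership tests.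
import Mathlib
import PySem

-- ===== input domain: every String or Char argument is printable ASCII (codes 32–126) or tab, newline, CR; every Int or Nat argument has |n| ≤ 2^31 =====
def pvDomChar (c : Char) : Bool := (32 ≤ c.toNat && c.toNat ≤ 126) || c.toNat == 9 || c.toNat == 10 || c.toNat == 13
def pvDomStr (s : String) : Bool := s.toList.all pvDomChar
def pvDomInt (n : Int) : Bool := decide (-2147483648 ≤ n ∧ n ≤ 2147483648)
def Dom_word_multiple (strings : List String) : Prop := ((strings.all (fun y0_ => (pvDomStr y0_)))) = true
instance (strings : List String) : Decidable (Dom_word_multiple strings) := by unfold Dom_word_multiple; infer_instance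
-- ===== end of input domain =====

-- B replaces A's running boolean-flipping loop by a Counter tally followed by a
-- dict comprehension thresholding each count at 1 (objective: idiomatic; same cost).

-- ===== PORT A =====
-- A: word_map = {}; for w: if w not in word_map: word_map[w] = False else: word_map[w] = True
def word_multiple (strings : List String) : List (String × Bool) :=
  (strings.foldl
    (fun d w => if d.contains w = false then d.insert w false else d.insert w true)
    (PySem.Dict.empty : PySem.Dict String Bool)).items

-- ===== PORT B =====
-- B: counts = Counter(strings); return {w: c > 1 for w, c in counts.items()}
def word_multiple_alt (strings : List String) : List (String × Bool) :=
  (PySem.Dict.ofList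
    ((PySem.Dict.counter strings).items.map (fun p => (p.1, decide ((1 : Int) < p.2))))).items

-- ===== PRECONDITION & SPEC =====
def Spec_word_multiple (strings : List String) (out : List (String × Bool)) : Prop := out = word_multiple_alt strings
instance (strings : List String) (out : List (String × Bool)) : Decidable (Spec_word_multiple strings out) := by unfold Spec_word_multiple; infer_instance

-- ===== CLAIM (what is proved, stated in full; the proofs are below) =====
def Claim_equal_word_multiple : Prop := ∀ (strings : List String), Dom_word_multiple strings → Spec_word_multiple strings (word_multiple strings)

-- ===== LEMMAS AND PROOFS =====

-- A's two-branch update inserts, in both branches, exactly the previous membership bit.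
lemma stepA_eq (d : PySem.Dict String Bool) (w : String) :
    (if d.contains w = false then d.insert w false else d.insert w true)
      = d.insert w (d.contains w) := by
  cases h : d.contains w <;> simp

-- Value stored by A's loop: the membership/multiplicity bit.
lemma getA (l : List String) (d : PySem.Dict String Bool) (k : String) :
    (l.foldl (fun d w => d.insert w (d.contains w)) d).getD k false
      = if l.count k = 0 then d.getD k false
        else (d.contains k || decide (2 ≤ l.count k)) := by
  induction l generalizing d with
  | nil => simp
  | cons x t ih =>
    simp only [List.foldl_cons]
    rw [ih]
    by_cases hk : k = x
    · subst hk
      rw [List.count_cons_self]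
      by_cases h0 : t.count k = 0
      · simp [h0]
      · have h1 : 2 ≤ t.count k + 1 := by omega
        simp [h0, h1]
    · have hxk : ¬x = k := fun h => hk h.symm
      have hbx : (k == x) = false := beq_eq_false_iff_ne.mpr hk
      simp [PySem.Dict.getD_insert, PySem.Dict.contains_insert, hk, hxk, hbx]

lemma wordA_items (strings : List String) :
    word_multiple strings
      = (PySem.Set.ofList strings).map
          (fun k => (k, decide (2 ≤ strings.count k))) := by
  unfold word_multiple
  simp only [stepA_eq]
  have hnd : (strings.foldl (fun d w => d.insert w (d.contains w))
      (PySem.Dict.empty : PySem.Dict String Bool)).keys.Nodup :=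
    PySem.Dict.nodup_keys_foldl_insert _ _ _ PySem.Dict.nodup_keys_empty
  rw [PySem.Dict.items_eq_map_keys _ hnd false]
  rw [PySem.Dict.keys_foldl_insert]
  simp only [PySem.Dict.keys_empty, PySem.Set.update_nil_left]
  apply List.map_congr_left
  intro k hk
  have hmem : k ∈ strings := (PySem.Set.mem_ofList strings k).1 hk
  have hc : strings.count k ≠ 0 := by
    simp [List.count_eq_zero, hmem]
  rw [getA]
  simp [hc]

-- a dict built from pairs with distinct keys has exactly those pairs as items
lemma items_ofList_nodup (l : List (String × Bool)) (h : (l.map Prod.fst).Nodup) :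
    (PySem.Dict.ofList l).items = l := by
  have hf := PySem.Dict.items_foldl_insert_fresh
    (l := l) (k := Prod.fst) (v := Prod.snd)
    (d := (PySem.Dict.empty : PySem.Dict String Bool))
    (by intro a _; simp) h
  have hofl : PySem.Dict.ofList l
      = l.foldl (fun d p => d.insert p.1 p.2) PySem.Dict.empty := rfl
  rw [hofl]
  simpa using hf

lemma wordB_items (strings : List String) :
    word_multiple_alt strings
      = (PySem.Set.ofList strings).map
          (fun k => (k, decide (2 ≤ strings.count k))) := by
  unfold word_multiple_alt
  rw [PySem.Dict.items_counter, List.map_map]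
  rw [items_ofList_nodup _ (by
    simp only [List.map_map]
    have : (Prod.fst ∘ ((fun p : String × Int => (p.1, decide ((1 : Int) < p.2)))
        ∘ fun k : String => (k, (strings.count k : Int)))) = id := by
      funext k; rfl
    rw [this, List.map_id]
    exact PySem.Set.nodup_ofList strings)]
  apply List.map_congr_left
  intro k _
  show (k, decide ((1 : Int) < (strings.count k : Int))) = (k, decide (2 ≤ strings.count k))
  have : ((1 : Int) < (strings.count k : Int)) ↔ (2 ≤ strings.count k) := by
    constructor <;> intro h <;> omega
  simp [this]

-- ===== VERDICT (by name: the statement is the Claim_ definition above) =====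
theorem word_multiple_spec : Claim_equal_word_multiple := by
  intro strings _
  unfold Spec_word_multiple
  rw [wordA_items, wordB_items]
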